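-- pv_equiv track=rewrite | github.com/jjones18/poe-toolkit | src/tools/league_tools/kalguur_dust/dust_data.py | _get_item_type
-- ===== SOURCE A (Python) =====
-- def _get_item_type(base_type: str, category: str) -> str:
--     """Determine item type from base type string."""
--     b = base_type.lower()
--
--     # Armour
--     if any(x in b for x in ['robe', 'vest', 'plate', 'coat', 'garb', 'regalia',
--                             'vestment', 'wrap', 'tunic', 'brigandine', 'doublet',
--                             'hauberk', 'lamellar', 'chainmail', 'ringmail', 'silks']):
--         return 'Body Armour'
--     if any(x in b for x in ['helmet', 'hat', 'cap', 'mask', 'circlet', 'crown',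
--                             'hood', 'burgonet', 'bascinet', 'sallet', 'coif', 'cage']):
--         return 'Helmet'
--     if any(x in b for x in ['gloves', 'gauntlets', 'mitts', 'bracers']):
--         return 'Gloves'
--     if any(x in b for x in ['boots', 'greaves', 'slippers', 'shoes']):
--         return 'Boots'
--     if any(x in b for x in ['shield', 'buckler']):
--         return 'Shield'
--
--     # Weapons
--     if category == 'UniqueWeapon':
--         if 'bow' in b: return 'Bow'
--         if 'staff' in b: return 'Staff'
--         if 'wand' in b: return 'Wand'
--         if 'sceptre' in b: return 'Sceptre'
--         if 'dagger' in b or 'knife' in b: return 'Dagger'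
--         if 'claw' in b: return 'Claw'
--         if 'sword' in b or 'rapier' in b or 'foil' in b:
--             return 'Two Handed Sword' if 'zwei' in b or 'great' in b else 'One Handed Sword'
--         if 'axe' in b:
--             return 'Two Handed Axe' if 'labrys' in b or 'great' in b else 'One Handed Axe'
--         if 'mace' in b or 'maul' in b or 'hammer' in b:
--             return 'Two Handed Mace' if 'maul' in b else 'One Handed Mace'
--
--     # Accessories
--     if category == 'UniqueAccessory':
--         if 'amulet' in b or 'talisman' in b: return 'Amulet'
--         if 'ring' in b: return 'Ring'
--         if 'belt' in b or 'sash' in b or 'stygian' in b: return 'Belt'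
--         if 'quiver' in b: return 'Quiver'
--
--     if category == 'UniqueFlask': return 'Flask'
--     if category == 'UniqueJewel':
--         if 'cluster' in b: return 'Cluster Jewel'
--         if 'abyss' in b: return 'Abyss Jewel'
--         return 'Jewel'
--
--     return 'Unknown'
-- ===== SOURCE B (Python) =====
-- # Different algorithm: instead of a sequential if-cascade with early returns,
-- # collect ALL applicable (priority, result) candidates from a flat rule list
-- # and pick the minimum-priority one with min(); order of scanning is irrelevant.
--
-- _RULES = [
--     # (priority, required category or None, keyword or None, result)
--     *[(0, None, k, 'Body Armour') for k in
--       ['robe', 'vest', 'plate', 'coat', 'garb', 'regalia', 'vestment', 'wrap',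
--        'tunic', 'brigandine', 'doublet', 'hauberk', 'lamellar', 'chainmail',
--        'ringmail', 'silks']],
--     *[(1, None, k, 'Helmet') for k in
--       ['helmet', 'hat', 'cap', 'mask', 'circlet', 'crown', 'hood', 'burgonet',
--        'bascinet', 'sallet', 'coif', 'cage']],
--     *[(2, None, k, 'Gloves') for k in ['gloves', 'gauntlets', 'mitts', 'bracers']],
--     *[(3, None, k, 'Boots') for k in ['boots', 'greaves', 'slippers', 'shoes']],
--     *[(4, None, k, 'Shield') for k in ['shield', 'buckler']],
--     (5, 'UniqueWeapon', 'bow', 'Bow'),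
--     (6, 'UniqueWeapon', 'staff', 'Staff'),
--     (7, 'UniqueWeapon', 'wand', 'Wand'),
--     (8, 'UniqueWeapon', 'sceptre', 'Sceptre'),
--     (9, 'UniqueWeapon', 'dagger', 'Dagger'),
--     (9, 'UniqueWeapon', 'knife', 'Dagger'),
--     (10, 'UniqueWeapon', 'claw', 'Claw'),
--     (11, 'UniqueWeapon', 'sword', 'Sword'),
--     (11, 'UniqueWeapon', 'rapier', 'Sword'),
--     (11, 'UniqueWeapon', 'foil', 'Sword'),
--     (12, 'UniqueWeapon', 'axe', 'Axe'),
--     (13, 'UniqueWeapon', 'mace', 'Mace'),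
--     (13, 'UniqueWeapon', 'maul', 'Mace'),
--     (13, 'UniqueWeapon', 'hammer', 'Mace'),
--     (14, 'UniqueAccessory', 'amulet', 'Amulet'),
--     (14, 'UniqueAccessory', 'talisman', 'Amulet'),
--     (15, 'UniqueAccessory', 'ring', 'Ring'),
--     (16, 'UniqueAccessory', 'belt', 'Belt'),
--     (16, 'UniqueAccessory', 'sash', 'Belt'),
--     (16, 'UniqueAccessory', 'stygian', 'Belt'),
--     (17, 'UniqueAccessory', 'quiver', 'Quiver'),
--     (18, 'UniqueFlask', None, 'Flask'),
--     (19, 'UniqueJewel', 'cluster', 'Cluster Jewel'),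
--     (20, 'UniqueJewel', 'abyss', 'Abyss Jewel'),
--     (21, 'UniqueJewel', None, 'Jewel'),
--     (99, None, None, 'Unknown'),
-- ]
--
-- # weapon families whose result needs a one-/two-handed prefix: result -> two-handed markers
-- _TWO_HANDED = {'Sword': ['zwei', 'great'], 'Axe': ['labrys', 'great'], 'Mace': ['maul']}
--
--
-- def _get_item_type(base_type: str, category: str) -> str:
--     """Determine item type from base type string."""
--     b = base_type.lower()
--     applicable = [(p, res) for p, gate, kw, res in _RULES
--                   if (gate is None or category == gate) and (kw is None or kw in b)]
--     _, res = min(applicable, key=lambda t: t[0])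
--     markers = _TWO_HANDED.get(res)
--     if markers:
--         return ('Two Handed ' if any(m in b for m in markers) else 'One Handed ') + res
--     return res
-- ===== Notes on version B (the rewrite author's own statement) =====
-- stated objective: alternative
-- what changed: Instead of a sequential if-cascade with early returns, B collects every applicable (priority, result) candidate from one flat rule list and returns the minimum-priority one via min(key=...), with a separate marker table adding the one-/two-handed prefix; scan order becomes irrelevant.
import Mathlib
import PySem

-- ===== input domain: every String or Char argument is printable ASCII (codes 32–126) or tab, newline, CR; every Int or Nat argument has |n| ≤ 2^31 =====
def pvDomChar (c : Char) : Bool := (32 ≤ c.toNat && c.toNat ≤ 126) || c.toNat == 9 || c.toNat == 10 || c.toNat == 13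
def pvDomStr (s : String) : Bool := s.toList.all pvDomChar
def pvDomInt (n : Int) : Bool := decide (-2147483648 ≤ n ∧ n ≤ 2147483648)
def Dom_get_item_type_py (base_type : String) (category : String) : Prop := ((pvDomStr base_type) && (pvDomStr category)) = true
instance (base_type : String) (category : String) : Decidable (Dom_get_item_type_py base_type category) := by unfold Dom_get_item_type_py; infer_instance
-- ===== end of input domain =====

-- B replaces A's sequential if-cascade by collecting all applicable (priority, result)
-- candidates from a flat rule list and taking the minimum-priority one; return value only.

-- ===== PORT A =====
-- Python's early returns inside the category-gated blocks become let-bound fall-through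
-- continuations ('accTail', 'tail'): exact on every input.
def get_item_type_py (base_type : String) (category : String) : String :=
  let b := PySem.Str.lower base_type
  if ["robe", "vest", "plate", "coat", "garb", "regalia", "vestment", "wrap", "tunic",
      "brigandine", "doublet", "hauberk", "lamellar", "chainmail", "ringmail", "silks"].any
      (fun x => PySem.Str.isIn x b) then "Body Armour"
  else if ["helmet", "hat", "cap", "mask", "circlet", "crown", "hood", "burgonet",
      "bascinet", "sallet", "coif", "cage"].any (fun x => PySem.Str.isIn x b) then "Helmet"
  else if ["gloves", "gauntlets", "mitts", "bracers"].any (fun x => PySem.Str.isIn x b) then "Gloves"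
  else if ["boots", "greaves", "slippers", "shoes"].any (fun x => PySem.Str.isIn x b) then "Boots"
  else if ["shield", "buckler"].any (fun x => PySem.Str.isIn x b) then "Shield"
  else
    let tail : String :=
      if category == "UniqueFlask" then "Flask"
      else if category == "UniqueJewel" then
        (if PySem.Str.isIn "cluster" b then "Cluster Jewel"
         else if PySem.Str.isIn "abyss" b then "Abyss Jewel"
         else "Jewel")
      else "Unknown"
    let accTail : String :=
      if category == "UniqueAccessory" then
        (if PySem.Str.isIn "amulet" b || PySem.Str.isIn "talisman" b then "Amulet"
         else if PySem.Str.isIn "ring" b then "Ring"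
         else if PySem.Str.isIn "belt" b || PySem.Str.isIn "sash" b || PySem.Str.isIn "stygian" b then "Belt"
         else if PySem.Str.isIn "quiver" b then "Quiver"
         else tail)
      else tail
    if category == "UniqueWeapon" then
      (if PySem.Str.isIn "bow" b then "Bow"
       else if PySem.Str.isIn "staff" b then "Staff"
       else if PySem.Str.isIn "wand" b then "Wand"
       else if PySem.Str.isIn "sceptre" b then "Sceptre"
       else if PySem.Str.isIn "dagger" b || PySem.Str.isIn "knife" b then "Dagger"
       else if PySem.Str.isIn "claw" b then "Claw"
       else if PySem.Str.isIn "sword" b || PySem.Str.isIn "rapier" b || PySem.Str.isIn "foil" b then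
         (if PySem.Str.isIn "zwei" b || PySem.Str.isIn "great" b then "Two Handed Sword" else "One Handed Sword")
       else if PySem.Str.isIn "axe" b then
         (if PySem.Str.isIn "labrys" b || PySem.Str.isIn "great" b then "Two Handed Axe" else "One Handed Axe")
       else if PySem.Str.isIn "mace" b || PySem.Str.isIn "maul" b || PySem.Str.isIn "hammer" b then
         (if PySem.Str.isIn "maul" b then "Two Handed Mace" else "One Handed Mace")
       else accTail)
    else accTail

-- ===== PORT B =====
-- flat rule list: (priority, required category or None, keyword or None, result)
def bRules : List (Int × Option String × Option String × String) :=
  [(0, none, some "robe", "Body Armour"), (0, none, some "vest", "Body Armour"),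
   (0, none, some "plate", "Body Armour"), (0, none, some "coat", "Body Armour"),
   (0, none, some "garb", "Body Armour"), (0, none, some "regalia", "Body Armour"),
   (0, none, some "vestment", "Body Armour"), (0, none, some "wrap", "Body Armour"),
   (0, none, some "tunic", "Body Armour"), (0, none, some "brigandine", "Body Armour"),
   (0, none, some "doublet", "Body Armour"), (0, none, some "hauberk", "Body Armour"),
   (0, none, some "lamellar", "Body Armour"), (0, none, some "chainmail", "Body Armour"),
   (0, none, some "ringmail", "Body Armour"), (0, none, some "silks", "Body Armour"),
   (1, none, some "helmet", "Helmet"), (1, none, some "hat", "Helmet"),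
   (1, none, some "cap", "Helmet"), (1, none, some "mask", "Helmet"),
   (1, none, some "circlet", "Helmet"), (1, none, some "crown", "Helmet"),
   (1, none, some "hood", "Helmet"), (1, none, some "burgonet", "Helmet"),
   (1, none, some "bascinet", "Helmet"), (1, none, some "sallet", "Helmet"),
   (1, none, some "coif", "Helmet"), (1, none, some "cage", "Helmet"),
   (2, none, some "gloves", "Gloves"), (2, none, some "gauntlets", "Gloves"),
   (2, none, some "mitts", "Gloves"), (2, none, some "bracers", "Gloves"),
   (3, none, some "boots", "Boots"), (3, none, some "greaves", "Boots"),
   (3, none, some "slippers", "Boots"), (3, none, some "shoes", "Boots"),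
   (4, none, some "shield", "Shield"), (4, none, some "buckler", "Shield"),
   (5, some "UniqueWeapon", some "bow", "Bow"),
   (6, some "UniqueWeapon", some "staff", "Staff"),
   (7, some "UniqueWeapon", some "wand", "Wand"),
   (8, some "UniqueWeapon", some "sceptre", "Sceptre"),
   (9, some "UniqueWeapon", some "dagger", "Dagger"),
   (9, some "UniqueWeapon", some "knife", "Dagger"),
   (10, some "UniqueWeapon", some "claw", "Claw"),
   (11, some "UniqueWeapon", some "sword", "Sword"),
   (11, some "UniqueWeapon", some "rapier", "Sword"),
   (11, some "UniqueWeapon", some "foil", "Sword"),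
   (12, some "UniqueWeapon", some "axe", "Axe"),
   (13, some "UniqueWeapon", some "mace", "Mace"),
   (13, some "UniqueWeapon", some "maul", "Mace"),
   (13, some "UniqueWeapon", some "hammer", "Mace"),
   (14, some "UniqueAccessory", some "amulet", "Amulet"),
   (14, some "UniqueAccessory", some "talisman", "Amulet"),
   (15, some "UniqueAccessory", some "ring", "Ring"),
   (16, some "UniqueAccessory", some "belt", "Belt"),
   (16, some "UniqueAccessory", some "sash", "Belt"),
   (16, some "UniqueAccessory", some "stygian", "Belt"),
   (17, some "UniqueAccessory", some "quiver", "Quiver"),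
   (18, some "UniqueFlask", none, "Flask"),
   (19, some "UniqueJewel", some "cluster", "Cluster Jewel"),
   (20, some "UniqueJewel", some "abyss", "Abyss Jewel"),
   (21, some "UniqueJewel", none, "Jewel"),
   (99, none, none, "Unknown")]

-- weapon families whose result needs a one-/two-handed prefix: result -> two-handed markers
def bTwoHanded : PySem.Dict String (List String) :=
  PySem.Dict.ofList [("Sword", ["zwei", "great"]), ("Axe", ["labrys", "great"]), ("Mace", ["maul"])]

-- the last four lines of B: prefix resolution for the selected (priority, result)
def bFinish (b : String) (pr : Int × String) : String :=
  match bTwoHanded.get? pr.2 with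
  | some markers =>
      (if markers.any (fun m => PySem.Str.isIn m b) then "Two Handed " else "One Handed ") ++ pr.2
  | none => pr.2

def get_item_type_py_alt (base_type : String) (category : String) : String :=
  let b := PySem.Str.lower base_type
  let applicable := (bRules.filter (fun r =>
      (match r.2.1 with | none => true | some g => category == g) &&
      (match r.2.2.1 with | none => true | some kw => PySem.Str.isIn kw b))).map
      (fun r => (r.1, r.2.2.2))
  -- Python's min() never sees an empty list (the (99, none, none, "Unknown") rule always
  -- applies), so the getD default is unreachable
  bFinish b ((PySem.List.min? applicable (fun t => t.1)).getD (99, "Unknown"))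

-- ===== PRECONDITION & SPEC =====
def Spec_get_item_type_py (base_type : String) (category : String) (out : String) : Prop := out = get_item_type_py_alt base_type category
instance (base_type : String) (category : String) (out : String) : Decidable (Spec_get_item_type_py base_type category out) := by unfold Spec_get_item_type_py; infer_instance

-- ===== CLAIM (what is proved, stated in full; the proofs are below) =====
def Claim_equal_get_item_type_py : Prop := ∀ (base_type : String) (category : String), Dom_get_item_type_py base_type category → Spec_get_item_type_py base_type category (get_item_type_py base_type category)

-- ===== LEMMAS AND PROOFS =====
-- on a priority-sorted list, Python's min(..., key=fst) is the head (the FIRST extremal element)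
theorem min?_eq_head? (l : List (Int × String)) (h : l.Pairwise (fun a c => a.1 ≤ c.1)) :
    PySem.List.min? l (fun t => t.1) = l.head? := by
  unfold PySem.List.min?
  cases l with
  | nil => rfl
  | cons x t =>
    rw [List.foldl_cons, List.head?_cons]
    have hx : ∀ y ∈ t, x.1 ≤ y.1 := (List.pairwise_cons.mp h).1
    clear h
    show List.foldl _ (some x) t = some x
    induction t generalizing x with
    | nil => rfl
    | cons y t ih =>
      rw [List.foldl_cons]
      show List.foldl _ (if y.1 < x.1 then some y else some x) t = some x
      rw [if_neg (not_lt.mpr (hx y List.mem_cons_self))]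
      exact ih x (fun z hz => hx z (List.mem_cons_of_mem _ hz))

theorem head_filter_map {α β : Type} (l : List α) (p : α → Bool) (f : α → β) :
    ((l.filter p).map f).head? = (l.find? p).map f := by
  rw [List.head?_map, List.head?_filter]

theorem find?_cons_if {α : Type} (p : α → Bool) (a : α) (l : List α) :
    List.find? p (a :: l) = if p a then some a else List.find? p l := by
  cases h : p a
  · simp [List.find?_cons_of_neg, h]
  · simp [List.find?_cons_of_pos, h]

theorem bRules_sorted : bRules.Pairwise (fun a c => a.1 ≤ c.1) := by decide

theorem if_collapse (a b : Bool) (r x : String) :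
    (if a then r else if b then r else x) = if (a || b) then r else x := by
  cases a <;> simp

theorem bFinish_p0 (b : String) : bFinish b (0, "Body Armour") = "Body Armour" := rfl
theorem bFinish_p1 (b : String) : bFinish b (1, "Helmet") = "Helmet" := rfl
theorem bFinish_p2 (b : String) : bFinish b (2, "Gloves") = "Gloves" := rfl
theorem bFinish_p3 (b : String) : bFinish b (3, "Boots") = "Boots" := rfl
theorem bFinish_p4 (b : String) : bFinish b (4, "Shield") = "Shield" := rfl
theorem bFinish_p5 (b : String) : bFinish b (5, "Bow") = "Bow" := rfl
theorem bFinish_p6 (b : String) : bFinish b (6, "Staff") = "Staff" := rfl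
theorem bFinish_p7 (b : String) : bFinish b (7, "Wand") = "Wand" := rfl
theorem bFinish_p8 (b : String) : bFinish b (8, "Sceptre") = "Sceptre" := rfl
theorem bFinish_p9 (b : String) : bFinish b (9, "Dagger") = "Dagger" := rfl
theorem bFinish_p10 (b : String) : bFinish b (10, "Claw") = "Claw" := rfl
theorem bFinish_p14 (b : String) : bFinish b (14, "Amulet") = "Amulet" := rfl
theorem bFinish_p15 (b : String) : bFinish b (15, "Ring") = "Ring" := rfl
theorem bFinish_p16 (b : String) : bFinish b (16, "Belt") = "Belt" := rfl
theorem bFinish_p17 (b : String) : bFinish b (17, "Quiver") = "Quiver" := rfl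
theorem bFinish_p18 (b : String) : bFinish b (18, "Flask") = "Flask" := rfl
theorem bFinish_p19 (b : String) : bFinish b (19, "Cluster Jewel") = "Cluster Jewel" := rfl
theorem bFinish_p20 (b : String) : bFinish b (20, "Abyss Jewel") = "Abyss Jewel" := rfl
theorem bFinish_p21 (b : String) : bFinish b (21, "Jewel") = "Jewel" := rfl
theorem bFinish_p99 (b : String) : bFinish b (99, "Unknown") = "Unknown" := rfl
theorem bFinish_sword (b : String) :
    bFinish b (11, "Sword") = if PySem.Str.isIn "zwei" b || PySem.Str.isIn "great" b then "Two Handed Sword" else "One Handed Sword" := by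
  have h : bFinish b (11, "Sword") =
      (if PySem.Str.isIn "zwei" b || (PySem.Str.isIn "great" b || false) then "Two Handed " else "One Handed ") ++ "Sword" := rfl
  rw [h]; simp only [Bool.or_false]; split <;> rfl
theorem bFinish_axe (b : String) :
    bFinish b (12, "Axe") = if PySem.Str.isIn "labrys" b || PySem.Str.isIn "great" b then "Two Handed Axe" else "One Handed Axe" := by
  have h : bFinish b (12, "Axe") =
      (if PySem.Str.isIn "labrys" b || (PySem.Str.isIn "great" b || false) then "Two Handed " else "One Handed ") ++ "Axe" := rfl
  rw [h]; simp only [Bool.or_false]; split <;> rfl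
theorem bFinish_mace (b : String) :
    bFinish b (13, "Mace") = if PySem.Str.isIn "maul" b then "Two Handed Mace" else "One Handed Mace" := by
  have h : bFinish b (13, "Mace") =
      (if PySem.Str.isIn "maul" b || false then "Two Handed " else "One Handed ") ++ "Mace" := rfl
  rw [h]; simp only [Bool.or_false]; split <;> rfl

-- ===== VERDICT (by name: the statement is the Claim_ definition above) =====
set_option maxHeartbeats 4000000 in
set_option maxRecDepth 8000 in
theorem get_item_type_py_spec : Claim_equal_get_item_type_py := by
  intro base_type category _
  unfold Spec_get_item_type_py get_item_type_py get_item_type_py_alt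
  dsimp only
  rw [min?_eq_head? _ (List.pairwise_map.mpr (bRules_sorted.filter _)), head_filter_map]
  by_cases h1 : category = "UniqueWeapon"
  · subst h1
    simp only [bRules, find?_cons_if, Bool.true_and, Bool.false_and, if_true, if_false,
      Bool.false_eq_true,
      apply_ite (Option.map (fun r : Int × Option String × Option String × String => (r.1, r.2.2.2))),
      apply_ite (fun o : Option (Int × String) => o.getD (99, "Unknown")),
      apply_ite (bFinish (PySem.Str.lower base_type)),
      Option.map_some, Option.getD_some, List.any_cons, List.any_nil, Bool.or_false,
      bFinish_p0, bFinish_p1, bFinish_p2, bFinish_p3, bFinish_p4, beq_self_eq_true, String.reduceBEq,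
      bFinish_p5, bFinish_p6, bFinish_p7, bFinish_p8, bFinish_p9, bFinish_p10,
      bFinish_sword, bFinish_axe, bFinish_mace, bFinish_p99, if_collapse, Bool.or_assoc]
  by_cases h2 : category = "UniqueAccessory"
  · subst h2
    simp only [bRules, find?_cons_if, Bool.true_and, Bool.false_and, if_true, if_false,
      Bool.false_eq_true,
      apply_ite (Option.map (fun r : Int × Option String × Option String × String => (r.1, r.2.2.2))),
      apply_ite (fun o : Option (Int × String) => o.getD (99, "Unknown")),
      apply_ite (bFinish (PySem.Str.lower base_type)),
      Option.map_some, Option.getD_some, List.any_cons, List.any_nil, Bool.or_false,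
      bFinish_p0, bFinish_p1, bFinish_p2, bFinish_p3, bFinish_p4, beq_self_eq_true, String.reduceBEq,
      bFinish_p14, bFinish_p15, bFinish_p16, bFinish_p17, bFinish_p99, if_collapse, Bool.or_assoc]
  by_cases h3 : category = "UniqueFlask"
  · subst h3
    simp only [bRules, find?_cons_if, Bool.true_and, Bool.false_and, if_true, if_false,
      Bool.false_eq_true,
      apply_ite (Option.map (fun r : Int × Option String × Option String × String => (r.1, r.2.2.2))),
      apply_ite (fun o : Option (Int × String) => o.getD (99, "Unknown")),
      apply_ite (bFinish (PySem.Str.lower base_type)),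
      Option.map_some, Option.getD_some, List.any_cons, List.any_nil, Bool.or_false,
      bFinish_p0, bFinish_p1, bFinish_p2, bFinish_p3, bFinish_p4, beq_self_eq_true, String.reduceBEq, bFinish_p18, if_collapse, Bool.or_assoc]
  by_cases h4 : category = "UniqueJewel"
  · subst h4
    simp only [bRules, find?_cons_if, Bool.true_and, Bool.false_and, if_true, if_false,
      Bool.false_eq_true,
      apply_ite (Option.map (fun r : Int × Option String × Option String × String => (r.1, r.2.2.2))),
      apply_ite (fun o : Option (Int × String) => o.getD (99, "Unknown")),
      apply_ite (bFinish (PySem.Str.lower base_type)),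
      Option.map_some, Option.getD_some, List.any_cons, List.any_nil, Bool.or_false,
      bFinish_p0, bFinish_p1, bFinish_p2, bFinish_p3, bFinish_p4, beq_self_eq_true, String.reduceBEq,
      bFinish_p19, bFinish_p20, bFinish_p21, if_collapse, Bool.or_assoc]
  have hb1 : (category == "UniqueWeapon") = false := beq_eq_false_iff_ne.mpr h1
  have hb2 : (category == "UniqueAccessory") = false := beq_eq_false_iff_ne.mpr h2
  have hb3 : (category == "UniqueFlask") = false := beq_eq_false_iff_ne.mpr h3
  have hb4 : (category == "UniqueJewel") = false := beq_eq_false_iff_ne.mpr h4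
  simp only [hb1, hb2, hb3, hb4, bRules, find?_cons_if, Bool.true_and, Bool.false_and, if_true, if_false,
      Bool.false_eq_true,
      apply_ite (Option.map (fun r : Int × Option String × Option String × String => (r.1, r.2.2.2))),
      apply_ite (fun o : Option (Int × String) => o.getD (99, "Unknown")),
      apply_ite (bFinish (PySem.Str.lower base_type)),
      Option.map_some, Option.getD_some, List.any_cons, List.any_nil, Bool.or_false,
      bFinish_p0, bFinish_p1, bFinish_p2, bFinish_p3, bFinish_p4, bFinish_p99, if_collapse, Bool.or_assoc]
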